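-- pv_equiv track=rewrite | github.com/DAMIENDURAND64/tanamo-front | backend/app/service.py | _normalize_nage_name
-- ===== SOURCE A (Python) =====
-- def _normalize_nage_name(nage_name: str) -> str:
--     """Normalise le nom de la nage pour correspondre au format FFN."""
--     # Mapping des noms abrégés vers les noms complets FFN
--     nage_map = {
--         'NL': 'NAGE LIBRE',
--         'Dos': 'DOS',
--         'Bra.': 'BRASSE',
--         'Pap.': 'PAPILLON',
--         '4 N.': '4 NAGES',
--     }
--
--     # Remplacer les abréviations par les noms complets
--     for abbrev, full_name in nage_map.items():
--         if abbrev in nage_name: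
--             nage_name = nage_name.replace(abbrev, full_name)
--
--     return nage_name.upper()
-- ===== SOURCE B (Python) =====
-- import re
--
-- _NAGE_MAP = {
--     'NL': 'NAGE LIBRE',
--     'Dos': 'DOS',
--     'Bra.': 'BRASSE',
--     'Pap.': 'PAPILLON',
--     '4 N.': '4 NAGES',
-- }
-- _NAGE_RE = re.compile('|'.join(map(re.escape, _NAGE_MAP)))
--
--
-- def _normalize_nage_name(nage_name: str) -> str:
--     """Normalise le nom de la nage pour correspondre au format FFN."""
--     return _NAGE_RE.sub(lambda m: _NAGE_MAP[m.group(0)], nage_name).upper()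
-- ===== Notes on version B (the rewrite author's own statement) =====
-- stated objective: idiomatic
-- what changed: One compiled regex built from the abbreviation keys substitutes all abbreviations in a single left-to-right pass (alternation tried in dict order at each position), replacing A's five sequential full-string replace() scans; the result is upper-cased once.
import Mathlib
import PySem

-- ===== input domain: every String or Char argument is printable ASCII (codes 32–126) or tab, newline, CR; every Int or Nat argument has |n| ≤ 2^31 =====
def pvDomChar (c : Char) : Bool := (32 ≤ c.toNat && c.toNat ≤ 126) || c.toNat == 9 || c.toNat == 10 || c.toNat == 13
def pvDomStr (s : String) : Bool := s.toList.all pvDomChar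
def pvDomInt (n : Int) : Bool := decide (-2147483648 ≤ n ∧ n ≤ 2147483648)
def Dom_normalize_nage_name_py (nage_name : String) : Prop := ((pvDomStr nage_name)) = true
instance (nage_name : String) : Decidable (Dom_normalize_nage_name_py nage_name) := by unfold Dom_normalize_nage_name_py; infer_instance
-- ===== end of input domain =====

-- B replaces A's five sequential full-string replace() passes by one compiled-regex
-- left-to-right substitution pass (alternation tried in dict order), then upper-cases once;
-- same return value, 'idiomatic' objective (not claimed faster).

-- ===== PORT A =====
-- the dict literal nage_map, iterated in insertion order
def pyNageMap : List (String × String) :=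
  [("NL", "NAGE LIBRE"), ("Dos", "DOS"), ("Bra.", "BRASSE"), ("Pap.", "PAPILLON"), ("4 N.", "4 NAGES")]

def normalize_nage_name_py (nage_name : String) : String :=
  PySem.Str.upper (pyNageMap.foldl
    (fun s kv => if PySem.Str.isIn kv.1 s then PySem.Str.replace s kv.1 kv.2 else s) nage_name)

-- ===== PORT B =====
-- the abbreviation keys and their replacements, as char lists
def KNL : List Char := ['N','L']
def KDOS : List Char := ['D','o','s']
def KBRA : List Char := ['B','r','a','.']
def KPAP : List Char := ['P','a','p','.']
def K4N : List Char := ['4',' ','N','.']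
def VNL : List Char := ['N','A','G','E',' ','L','I','B','R','E']
def VDOS : List Char := ['D','O','S']
def VBRA : List Char := ['B','R','A','S','S','E']
def VPAP : List Char := ['P','A','P','I','L','L','O','N']
def V4N : List Char := ['4',' ','N','A','G','E','S']

-- re.sub with the compiled pattern 'NL|Dos|Bra\.|Pap\.|4\ N\.' scans the string once, left to
-- right; at each position the alternatives are tried in dict order, the first literal that matches
-- is replaced by its dict value (lookup inlined per branch) and the scan resumes after the match.
-- re.sub is not in PySem, so it is ported by hand; for this literal alternation pattern this
-- recursion is exact.
def bSub : List Char → List Char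
  | [] => []
  | c :: t =>
    if List.isPrefixOf KNL (c :: t) then VNL ++ bSub (t.drop 1)
    else if List.isPrefixOf KDOS (c :: t) then VDOS ++ bSub (t.drop 2)
    else if List.isPrefixOf KBRA (c :: t) then VBRA ++ bSub (t.drop 3)
    else if List.isPrefixOf KPAP (c :: t) then VPAP ++ bSub (t.drop 3)
    else if List.isPrefixOf K4N (c :: t) then V4N ++ bSub (t.drop 3)
    else c :: bSub t
termination_by l => l.length
decreasing_by all_goals simp

-- Safe u v: no nonempty suffix of u is prefix-compatible with v

def normalize_nage_name_py_alt (nage_name : String) : String :=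
  String.ofList (PySem.Chars.upper (bSub nage_name.toList))

-- ===== PRECONDITION & SPEC =====
def Spec_normalize_nage_name_py (nage_name : String) (out : String) : Prop := out = normalize_nage_name_py_alt nage_name
instance (nage_name : String) (out : String) : Decidable (Spec_normalize_nage_name_py nage_name out) := by unfold Spec_normalize_nage_name_py; infer_instance

-- ===== CLAIM (what is proved, stated in full; the proofs are below) =====
def Claim_equal_normalize_nage_name_py : Prop := ∀ (nage_name : String), Dom_normalize_nage_name_py nage_name → Spec_normalize_nage_name_py nage_name (normalize_nage_name_py nage_name)

-- ===== LEMMAS AND PROOFS =====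
-- onepass old new is Python's s.replace(old, new) for old ≠ [] (proved below from replace.go):
-- a single left-to-right pass replacing each occurrence of old.
def onepass (old new : List Char) : List Char → List Char
  | [] => []
  | c :: t =>
    if List.isPrefixOf old (c :: t) then new ++ onepass old new (t.drop (old.length - 1))
    else c :: onepass old new t
termination_by l => l.length
decreasing_by all_goals simp

lemma onepass_nil (old new : List Char) : onepass old new [] = [] := by simp [onepass]

lemma onepass_match (old new : List Char) (c : Char) (t : List Char)
    (h : List.isPrefixOf old (c :: t)) :
    onepass old new (c :: t) = new ++ onepass old new (t.drop (old.length - 1)) := by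
  rw [onepass]; simp [h]

lemma onepass_nomatch (old new : List Char) (c : Char) (t : List Char)
    (h : ¬ List.isPrefixOf old (c :: t)) :
    onepass old new (c :: t) = c :: onepass old new t := by
  rw [onepass]; simp [h]

-- replace = onepass

lemma go_eq (old new : List Char) (ho : old ≠ []) :
    ∀ fuel l acc, l.length ≤ fuel →
      PySem.Chars.replace.go old new fuel l acc = acc.reverse ++ onepass old new l := by
  intro fuel
  induction fuel with
  | zero => intro l acc h; cases l with
    | nil => simp [PySem.Chars.replace.go, onepass_nil]
    | cons c t => simp at h
  | succ n ih =>
    intro l acc h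
    cases l with
    | nil => simp [PySem.Chars.replace.go, onepass_nil]
    | cons c t =>
      by_cases hp : List.isPrefixOf old (c :: t)
      · rw [PySem.Chars.replace.go]
        simp only [hp, if_pos]
        have h1 : 0 < old.length := List.length_pos_iff.mpr ho
        have hlen : (List.drop old.length (c :: t)).length ≤ n := by
          simp at h ⊢; omega
        rw [ih _ _ hlen, onepass_match old new c t hp]
        obtain ⟨k, hk, hold⟩ : ∃ k u, old = k :: u := by
          cases old with | nil => exact absurd rfl ho | cons a b => exact ⟨a, b, rfl⟩
        subst hold
        simp
      · rw [PySem.Chars.replace.go]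
        simp only [hp, if_neg, Bool.false_eq_true, not_false_iff]
        have hlen : t.length ≤ n := by simp at h; omega
        rw [ih _ _ hlen, onepass_nomatch old new c t hp]
        simp

lemma replace_eq_onepass (s old new : List Char) (ho : old ≠ []) :
    PySem.Chars.replace s old new = onepass old new s := by
  rw [PySem.Chars.replace]
  simp [List.isEmpty_iff, ho]
  exact go_eq old new ho s.length s [] le_rfl

-- no occurrence → identity

lemma onepass_nooccur (old new : List Char) :
    ∀ l, ¬ old <:+: l → onepass old new l = l := by
  intro l
  induction l with
  | nil => intro _; exact onepass_nil _ _
  | cons c t ih =>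
    intro h
    have hp : ¬ List.isPrefixOf old (c :: t) := by
      intro hp
      exact h ((List.isPrefixOf_iff_prefix.mp hp).isInfix)
    rw [onepass_nomatch _ _ _ _ hp, ih]
    intro hi
    exact h (List.infix_cons hi)

-- Safe u v: no nonempty suffix of u is prefix-comparable with v, so no occurrence of v can
-- start inside u; decidable, checked by `decide` on the concrete keys/values.
def Safe (u v : List Char) : Bool :=
  u.tails.all fun s => s.isEmpty || (!(List.isPrefixOf s v) && !(List.isPrefixOf v s))

lemma prefix_append_split {u a b : List Char} (h : u <+: a ++ b) : u <+: a ∨ a <+: u :=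
  List.prefix_or_prefix_of_prefix h (List.prefix_append a b)

lemma safe_tail {c : Char} {u v : List Char} (h : Safe (c :: u) v = true) : Safe u v = true := by
  rw [Safe] at h ⊢
  rw [List.tails_cons, List.all_cons] at h
  exact ((Bool.and_eq_true _ _).mp h).2

lemma safe_self {u v : List Char} (h : Safe u v = true) (hne : u ≠ []) :
    ¬ u <+: v ∧ ¬ v <+: u := by
  have h' := List.all_eq_true.mp (by rw [Safe] at h; exact h) u (by simp [List.mem_tails])
  simp only [List.isEmpty_iff, hne, Bool.or_eq_true, Bool.and_eq_true, Bool.not_eq_true',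
    false_or] at h'
  exact ⟨fun hp => by simp [List.isPrefixOf_iff_prefix.mpr hp] at h',
         fun hp => by simp [List.isPrefixOf_iff_prefix.mpr hp] at h'⟩

lemma onepass_passthrough (k v : List Char) :
    ∀ (w : List Char), Safe w k = true → ∀ x, onepass k v (w ++ x) = w ++ onepass k v x := by
  intro w
  induction w with
  | nil => intro _ x; simp
  | cons c w' ih =>
    intro hs x
    have hnp : ¬ List.isPrefixOf k ((c :: w') ++ x) := by
      intro hp
      have hp' := List.isPrefixOf_iff_prefix.mp hp
      rcases prefix_append_split hp' with h1 | h2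
      · exact (safe_self hs (by simp)).2 h1
      · exact (safe_self hs (by simp)).1 h2
    rw [List.cons_append, onepass_nomatch _ _ _ _ (by simpa using hnp),
        ih (safe_tail hs) x, List.cons_append]

lemma onepass_pull (k v : List Char) :
    ∀ (n : Nat) (x : List Char), x.length ≤ n → ∀ u, Safe u v = true → u <+: onepass k v x → u <+: x := by
  intro n
  induction n with
  | zero =>
    intro x hx u _ hp
    cases x with
    | nil => simpa [onepass_nil] using hp
    | cons c t => simp at hx
  | succ m ih =>
    intro x hx u hs hp
    cases x with
    | nil => simpa [onepass_nil] using hp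
    | cons c t =>
      cases u with
      | nil => simp
      | cons a u' =>
        by_cases hm : List.isPrefixOf k (c :: t)
        · rw [onepass_match _ _ _ _ hm] at hp
          rcases prefix_append_split hp with h1 | h2
          · exact absurd h1 (safe_self hs (by simp)).1
          · exact absurd h2 (safe_self hs (by simp)).2
        · rw [onepass_nomatch _ _ _ _ hm] at hp
          rw [List.cons_prefix_cons] at hp
          obtain ⟨rfl, hp'⟩ := hp
          have ht : u' <+: t := ih t (by simp at hx; omega) u' (safe_tail hs) hp'
          exact List.cons_prefix_cons.mpr ⟨rfl, ht⟩

lemma main : ∀ (n : Nat) (l : List Char), l.length ≤ n →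
    bSub l = onepass K4N V4N (onepass KPAP VPAP (onepass KBRA VBRA
      (onepass KDOS VDOS (onepass KNL VNL l)))) := by
  intro n
  induction n with
  | zero =>
    intro l hl
    have : l = [] := by cases l with | nil => rfl | cons a b => simp at hl
    subst this
    simp [bSub, onepass_nil]
  | succ m ih =>
    intro l hl
    cases l with
    | nil => simp [bSub, onepass_nil]
    | cons c t =>
      by_cases hm1 : List.isPrefixOf KNL (c :: t)
      · -- 'NL' matches at the front
        obtain ⟨r, hr⟩ := List.isPrefixOf_iff_prefix.mp hm1
        simp only [KNL] at hr
        obtain ⟨hc, ht⟩ : 'N' = c ∧ 'L' :: r = t := by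
          simpa using hr
        subst hc; subst ht
        rw [onepass_match KNL VNL _ _ (by simp [KNL, List.isPrefixOf])]
        rw [show ('L' :: r).drop (KNL.length - 1) = r by simp [KNL]]
        rw [onepass_passthrough KDOS VDOS VNL (by decide)]
        rw [onepass_passthrough KBRA VBRA VNL (by decide)]
        rw [onepass_passthrough KPAP VPAP VNL (by decide)]
        rw [onepass_passthrough K4N V4N VNL (by decide)]
        rw [bSub.eq_def]
        simp only [KNL, VNL, List.isPrefixOf, List.drop]
        simp [ih r (by simp at hl; omega), KNL, VNL]
      · by_cases hm2 : List.isPrefixOf KDOS (c :: t)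
        · -- 'Dos' matches at the front
          obtain ⟨r, hr⟩ := List.isPrefixOf_iff_prefix.mp hm2
          simp only [KDOS] at hr
          obtain ⟨hc, ht⟩ : 'D' = c ∧ 'o' :: 's' :: r = t := by simpa using hr
          subst hc; subst ht
          conv_rhs => rw [show ('D' : Char) :: 'o' :: 's' :: r = KDOS ++ r from by simp [KDOS]]
          rw [onepass_passthrough KNL VNL KDOS (by decide)]
          rw [show KDOS ++ onepass KNL VNL r = 'D' :: 'o' :: 's' :: onepass KNL VNL r from by
            simp [KDOS]]
          rw [onepass_match KDOS VDOS _ _ (by simp [KDOS, List.isPrefixOf])]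
          rw [show ('o' :: 's' :: onepass KNL VNL r).drop (KDOS.length - 1) = onepass KNL VNL r from by
            simp [KDOS]]
          rw [onepass_passthrough KBRA VBRA VDOS (by decide)]
          rw [onepass_passthrough KPAP VPAP VDOS (by decide)]
          rw [onepass_passthrough K4N V4N VDOS (by decide)]
          rw [bSub.eq_def]
          simp [ih r (by simp at hl; omega), KNL, KDOS, KBRA, KPAP, K4N, VNL, VDOS, VBRA, VPAP, V4N,
            List.isPrefixOf]
        · by_cases hm3 : List.isPrefixOf KBRA (c :: t)
          · -- 'Bra.' matches at the front
            obtain ⟨r, hr⟩ := List.isPrefixOf_iff_prefix.mp hm3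
            simp only [KBRA] at hr
            obtain ⟨hc, ht⟩ : 'B' = c ∧ 'r' :: 'a' :: '.' :: r = t := by simpa using hr
            subst hc; subst ht
            conv_rhs => rw [show ('B' : Char) :: 'r' :: 'a' :: '.' :: r = KBRA ++ r from by simp [KBRA]]
            rw [onepass_passthrough KNL VNL KBRA (by decide)]
            rw [onepass_passthrough KDOS VDOS KBRA (by decide)]
            rw [show KBRA ++ onepass KDOS VDOS (onepass KNL VNL r)
                = 'B' :: 'r' :: 'a' :: '.' :: onepass KDOS VDOS (onepass KNL VNL r) from by
              simp [KBRA]]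
            rw [onepass_match KBRA VBRA _ _ (by simp [KBRA, List.isPrefixOf])]
            rw [show ('r' :: 'a' :: '.' :: onepass KDOS VDOS (onepass KNL VNL r)).drop (KBRA.length - 1)
                = onepass KDOS VDOS (onepass KNL VNL r) from by simp [KBRA]]
            rw [onepass_passthrough KPAP VPAP VBRA (by decide)]
            rw [onepass_passthrough K4N V4N VBRA (by decide)]
            rw [bSub.eq_def]
            simp [ih r (by simp at hl; omega), KNL, KDOS, KBRA, KPAP, K4N, VNL, VDOS, VBRA, VPAP, V4N,
              List.isPrefixOf]
          · by_cases hm4 : List.isPrefixOf KPAP (c :: t)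
            · -- 'Pap.' matches at the front
              obtain ⟨r, hr⟩ := List.isPrefixOf_iff_prefix.mp hm4
              simp only [KPAP] at hr
              obtain ⟨hc, ht⟩ : 'P' = c ∧ 'a' :: 'p' :: '.' :: r = t := by simpa using hr
              subst hc; subst ht
              conv_rhs => rw [show ('P' : Char) :: 'a' :: 'p' :: '.' :: r = KPAP ++ r from by simp [KPAP]]
              rw [onepass_passthrough KNL VNL KPAP (by decide)]
              rw [onepass_passthrough KDOS VDOS KPAP (by decide)]
              rw [onepass_passthrough KBRA VBRA KPAP (by decide)]
              rw [show KPAP ++ onepass KBRA VBRA (onepass KDOS VDOS (onepass KNL VNL r))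
                  = 'P' :: 'a' :: 'p' :: '.' :: onepass KBRA VBRA (onepass KDOS VDOS (onepass KNL VNL r)) from by
                simp [KPAP]]
              rw [onepass_match KPAP VPAP _ _ (by simp [KPAP, List.isPrefixOf])]
              rw [show ('a' :: 'p' :: '.' :: onepass KBRA VBRA (onepass KDOS VDOS (onepass KNL VNL r))).drop (KPAP.length - 1)
                  = onepass KBRA VBRA (onepass KDOS VDOS (onepass KNL VNL r)) from by simp [KPAP]]
              rw [onepass_passthrough K4N V4N VPAP (by decide)]
              rw [bSub.eq_def]
              simp [ih r (by simp at hl; omega), KNL, KDOS, KBRA, KPAP, K4N, VNL, VDOS, VBRA, VPAP, V4N,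
                List.isPrefixOf]
            · by_cases hm5 : List.isPrefixOf K4N (c :: t)
              · -- '4 N.' matches at the front
                obtain ⟨r, hr⟩ := List.isPrefixOf_iff_prefix.mp hm5
                simp only [K4N] at hr
                obtain ⟨hc, ht⟩ : '4' = c ∧ ' ' :: 'N' :: '.' :: r = t := by simpa using hr
                subst hc; subst ht
                conv_rhs => rw [show ('4' : Char) :: ' ' :: 'N' :: '.' :: r = K4N ++ r from by simp [K4N]]
                rw [onepass_passthrough KNL VNL K4N (by decide)]
                rw [onepass_passthrough KDOS VDOS K4N (by decide)]
                rw [onepass_passthrough KBRA VBRA K4N (by decide)]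
                rw [onepass_passthrough KPAP VPAP K4N (by decide)]
                rw [show K4N ++ onepass KPAP VPAP (onepass KBRA VBRA (onepass KDOS VDOS (onepass KNL VNL r)))
                    = '4' :: ' ' :: 'N' :: '.' :: onepass KPAP VPAP (onepass KBRA VBRA (onepass KDOS VDOS (onepass KNL VNL r))) from by
                  simp [K4N]]
                rw [onepass_match K4N V4N _ _ (by simp [K4N, List.isPrefixOf])]
                rw [show (' ' :: 'N' :: '.' :: onepass KPAP VPAP (onepass KBRA VBRA (onepass KDOS VDOS (onepass KNL VNL r)))).drop (K4N.length - 1)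
                    = onepass KPAP VPAP (onepass KBRA VBRA (onepass KDOS VDOS (onepass KNL VNL r))) from by simp [K4N]]
                rw [bSub.eq_def]
                simp [ih r (by simp at hl; omega), KNL, KDOS, KBRA, KPAP, K4N, VNL, VDOS, VBRA, VPAP, V4N,
                  List.isPrefixOf]
              · -- no abbreviation matches at this position
                have e1 : onepass KNL VNL (c :: t) = c :: onepass KNL VNL t :=
                  onepass_nomatch _ _ _ _ hm1
                have hn2 : ¬ List.isPrefixOf KDOS (c :: onepass KNL VNL t) := by
                  intro h
                  have h' := List.isPrefixOf_iff_prefix.mp h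
                  rw [show KDOS = 'D' :: ['o','s'] from by simp [KDOS], List.cons_prefix_cons] at h'
                  obtain ⟨hc, htl⟩ := h'
                  have ht : ['o','s'] <+: t :=
                    onepass_pull KNL VNL t.length t le_rfl _ (by decide) htl
                  exact hm2 (List.isPrefixOf_iff_prefix.mpr (by
                    rw [show KDOS = 'D' :: ['o','s'] from by simp [KDOS]]
                    exact List.cons_prefix_cons.mpr ⟨hc, ht⟩))
                have e2 : onepass KDOS VDOS (c :: onepass KNL VNL t)
                    = c :: onepass KDOS VDOS (onepass KNL VNL t) :=
                  onepass_nomatch _ _ _ _ hn2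
                have hn3 : ¬ List.isPrefixOf KBRA (c :: onepass KDOS VDOS (onepass KNL VNL t)) := by
                  intro h
                  have h' := List.isPrefixOf_iff_prefix.mp h
                  rw [show KBRA = 'B' :: ['r','a','.'] from by simp [KBRA], List.cons_prefix_cons] at h'
                  obtain ⟨hc, htl⟩ := h'
                  have h2 : ['r','a','.'] <+: onepass KNL VNL t :=
                    onepass_pull KDOS VDOS _ _ le_rfl _ (by decide) htl
                  have ht : ['r','a','.'] <+: t :=
                    onepass_pull KNL VNL t.length t le_rfl _ (by decide) h2
                  exact hm3 (List.isPrefixOf_iff_prefix.mpr (by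
                    rw [show KBRA = 'B' :: ['r','a','.'] from by simp [KBRA]]
                    exact List.cons_prefix_cons.mpr ⟨hc, ht⟩))
                have e3 : onepass KBRA VBRA (c :: onepass KDOS VDOS (onepass KNL VNL t))
                    = c :: onepass KBRA VBRA (onepass KDOS VDOS (onepass KNL VNL t)) :=
                  onepass_nomatch _ _ _ _ hn3
                have hn4 : ¬ List.isPrefixOf KPAP
                    (c :: onepass KBRA VBRA (onepass KDOS VDOS (onepass KNL VNL t))) := by
                  intro h
                  have h' := List.isPrefixOf_iff_prefix.mp h
                  rw [show KPAP = 'P' :: ['a','p','.'] from by simp [KPAP], List.cons_prefix_cons] at h'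
                  obtain ⟨hc, htl⟩ := h'
                  have h3 : ['a','p','.'] <+: onepass KDOS VDOS (onepass KNL VNL t) :=
                    onepass_pull KBRA VBRA _ _ le_rfl _ (by decide) htl
                  have h2 : ['a','p','.'] <+: onepass KNL VNL t :=
                    onepass_pull KDOS VDOS _ _ le_rfl _ (by decide) h3
                  have ht : ['a','p','.'] <+: t :=
                    onepass_pull KNL VNL t.length t le_rfl _ (by decide) h2
                  exact hm4 (List.isPrefixOf_iff_prefix.mpr (by
                    rw [show KPAP = 'P' :: ['a','p','.'] from by simp [KPAP]]
                    exact List.cons_prefix_cons.mpr ⟨hc, ht⟩))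
                have e4 : onepass KPAP VPAP (c :: onepass KBRA VBRA (onepass KDOS VDOS (onepass KNL VNL t)))
                    = c :: onepass KPAP VPAP (onepass KBRA VBRA (onepass KDOS VDOS (onepass KNL VNL t))) :=
                  onepass_nomatch _ _ _ _ hn4
                have hn5 : ¬ List.isPrefixOf K4N
                    (c :: onepass KPAP VPAP (onepass KBRA VBRA (onepass KDOS VDOS (onepass KNL VNL t)))) := by
                  intro h
                  have h' := List.isPrefixOf_iff_prefix.mp h
                  rw [show K4N = '4' :: [' ','N','.'] from by simp [K4N], List.cons_prefix_cons] at h'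
                  obtain ⟨hc, htl⟩ := h'
                  have h4 : [' ','N','.'] <+: onepass KBRA VBRA (onepass KDOS VDOS (onepass KNL VNL t)) :=
                    onepass_pull KPAP VPAP _ _ le_rfl _ (by decide) htl
                  have h3 : [' ','N','.'] <+: onepass KDOS VDOS (onepass KNL VNL t) :=
                    onepass_pull KBRA VBRA _ _ le_rfl _ (by decide) h4
                  have h2 : [' ','N','.'] <+: onepass KNL VNL t :=
                    onepass_pull KDOS VDOS _ _ le_rfl _ (by decide) h3
                  have ht : [' ','N','.'] <+: t :=
                    onepass_pull KNL VNL t.length t le_rfl _ (by decide) h2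
                  exact hm5 (List.isPrefixOf_iff_prefix.mpr (by
                    rw [show K4N = '4' :: [' ','N','.'] from by simp [K4N]]
                    exact List.cons_prefix_cons.mpr ⟨hc, ht⟩))
                have e5 : onepass K4N V4N (c :: onepass KPAP VPAP (onepass KBRA VBRA (onepass KDOS VDOS (onepass KNL VNL t))))
                    = c :: onepass K4N V4N (onepass KPAP VPAP (onepass KBRA VBRA (onepass KDOS VDOS (onepass KNL VNL t)))) :=
                  onepass_nomatch _ _ _ _ hn5
                rw [e1, e2, e3, e4, e5, bSub.eq_def]
                simp [ih t (by simp at hl; omega), hm1, hm2, hm3, hm4, hm5]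

-- one step of A's fold, at the char-list level, is exactly onepass
lemma step_eq (k v : String) (hk : k.toList ≠ []) (s : String) :
    (if PySem.Str.isIn k s then PySem.Str.replace s k v else s).toList
      = onepass k.toList v.toList s.toList := by
  by_cases h : PySem.Str.isIn k s
  · rw [if_pos h, PySem.Str.toList_replace]
    exact replace_eq_onepass _ _ _ hk
  · rw [if_neg h]
    refine (onepass_nooccur _ _ _ ?_).symm
    intro hi
    exact h ((PySem.Str.isIn_iff_infix k s).mpr hi)

-- ===== VERDICT (by name: the statement is the Claim_ definition above) =====
theorem normalize_nage_name_py_spec : Claim_equal_normalize_nage_name_py := by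
  unfold Claim_equal_normalize_nage_name_py
  intro s _
  unfold Spec_normalize_nage_name_py
  rw [← String.toList_inj]
  rw [normalize_nage_name_py, normalize_nage_name_py_alt, String.toList_ofList,
    PySem.Str.toList_upper]
  simp only [pyNageMap, List.foldl]
  rw [step_eq "4 N." "4 NAGES" (by decide), step_eq "Pap." "PAPILLON" (by decide),
    step_eq "Bra." "BRASSE" (by decide), step_eq "Dos" "DOS" (by decide),
    step_eq "NL" "NAGE LIBRE" (by decide)]
  rw [show "NL".toList = KNL from rfl, show "NAGE LIBRE".toList = VNL from rfl,
    show "Dos".toList = KDOS from rfl, show "DOS".toList = VDOS from rfl,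
    show "Bra.".toList = KBRA from rfl, show "BRASSE".toList = VBRA from rfl,
    show "Pap.".toList = KPAP from rfl, show "PAPILLON".toList = VPAP from rfl,
    show "4 N.".toList = K4N from rfl, show "4 NAGES".toList = V4N from rfl]
  rw [(main s.toList.length s.toList le_rfl)]
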